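-- pv_equiv track=rewrite | github.com/aadvertru/AI_monitor | libs/analysis/mention_extraction.py | _normalized_with_index_map
-- ===== SOURCE A (Python) =====
-- def _normalized_with_index_map(sentence: str) -> tuple[str, list[int]]:
--     normalized_chars: list[str] = []
--     index_map: list[int] = []
--     for index, char in enumerate(sentence):
--         if char.isalnum():
--             normalized_chars.append(char)
--             index_map.append(index)
--     return "".join(normalized_chars), index_map
-- ===== SOURCE B (Python) =====
-- def _normalized_with_index_map(sentence: str) -> tuple[str, list[int]]:
--     n = len(sentence)
--     parts: list[str] = []
--     index_map: list[int] = []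
--     i = 0
--     while i < n:
--         if not sentence[i].isalnum():
--             i += 1
--             continue
--         j = i + 1
--         while j < n and sentence[j].isalnum():
--             j += 1
--         parts.append(sentence[i:j])
--         index_map.extend(range(i, j))
--         i = j
--     return "".join(parts), index_map
-- ===== Notes on version B (the rewrite author's own statement) =====
-- stated objective: alternative
-- what changed: Replaces A's char-by-char fused loop by a two-pointer run scanner: an outer while skips non-alnum chars, an inner while finds the end of each maximal alphanumeric run, and whole runs are emitted at once as a slice plus a range of indices.
import Mathlib
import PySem

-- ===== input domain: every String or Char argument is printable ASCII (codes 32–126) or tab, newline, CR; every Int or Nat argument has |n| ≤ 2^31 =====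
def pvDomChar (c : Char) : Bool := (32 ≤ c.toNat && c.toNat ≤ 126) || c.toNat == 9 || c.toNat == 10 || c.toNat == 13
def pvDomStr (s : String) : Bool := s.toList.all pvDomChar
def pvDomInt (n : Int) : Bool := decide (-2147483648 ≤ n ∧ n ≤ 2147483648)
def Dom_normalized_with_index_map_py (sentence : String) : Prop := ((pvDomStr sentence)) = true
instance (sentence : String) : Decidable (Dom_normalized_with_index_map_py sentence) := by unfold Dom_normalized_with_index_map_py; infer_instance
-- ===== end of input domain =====

-- B replaces A's fused char-by-char loop by a two-pointer maximal-run scanner emitting slices (alternative, same cost); return value only, no mutation.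

-- ===== PORT A =====
-- A: one loop over enumerate(sentence) appending to two accumulators.
def normalized_with_index_map_py (sentence : String) : String × List Int :=
  let res := (PySem.List.enumerate sentence.toList 0).foldl
    (fun (acc : List Char × List Int) ic =>
      if PySem.Chars.isalnum ic.2 then (acc.1 ++ [ic.2], acc.2 ++ [ic.1]) else acc)
    ([], [])
  (String.mk res.1, res.2)

-- ===== PORT B =====
-- B's inner while loop: advance j while sentence[j] is alphanumeric.
def pvScanRun (xs : List Char) (j : Nat) : Nat :=
  if h : j < xs.length then
    if PySem.Chars.isalnum xs[j] then pvScanRun xs (j + 1) else j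
  else j
termination_by xs.length - j

-- needed by pvRunLoop's termination proof (the port cites it by name)
theorem pvScanRun_ge (xs : List Char) (j : Nat) : j ≤ pvScanRun xs j := by
  rw [pvScanRun]
  split
  next h =>
    split
    next => exact le_trans (Nat.le_succ j) (pvScanRun_ge xs (j + 1))
    next => exact le_refl j
  next => exact le_refl j
termination_by xs.length - j

-- B's outer while loop: skip a non-alnum char, or emit a whole run (slice + range of indices).
def pvRunLoop (xs : List Char) (i : Nat) (parts : List (List Char)) (idxs : List Int) :
    List (List Char) × List Int :=
  if h : i < xs.length then
    if PySem.Chars.isalnum xs[i] then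
      let j := pvScanRun xs (i + 1)
      pvRunLoop xs j (parts ++ [PySem.List.slice xs (some (i : Int)) (some (j : Int))])
        (idxs ++ PySem.List.pyRange (i : Int) (j : Int) 1)
    else
      pvRunLoop xs (i + 1) parts idxs
  else (parts, idxs)
termination_by xs.length - i
decreasing_by
  · have := pvScanRun_ge xs (i + 1); omega
  · omega

def normalized_with_index_map_py_alt (sentence : String) : String × List Int :=
  let r := pvRunLoop sentence.toList 0 [] []
  (String.mk (PySem.Chars.join [] r.1), r.2)

-- ===== PRECONDITION & SPEC =====
def Spec_normalized_with_index_map_py (sentence : String) (out : String × List Int) : Prop := out = normalized_with_index_map_py_alt sentence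
instance (sentence : String) (out : String × List Int) : Decidable (Spec_normalized_with_index_map_py sentence out) := by unfold Spec_normalized_with_index_map_py; infer_instance

-- ===== CLAIM (what is proved, stated in full; the proofs are below) =====
def Claim_equal_normalized_with_index_map_py : Prop := ∀ (sentence : String), Dom_normalized_with_index_map_py sentence → Spec_normalized_with_index_map_py sentence (normalized_with_index_map_py sentence)

-- ===== LEMMAS AND PROOFS =====

-- Common reference: the filtered chars and (start-offset) indices, structurally on the list.
def pvRef (xs : List Char) (k : Int) : List Char × List Int :=
  match xs with
  | [] => ([], [])
  | c :: t =>
    let r := pvRef t (k + 1)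
    if PySem.Chars.isalnum c then (c :: r.1, k :: r.2) else r

-- ''.join with empty separator is flatten.
theorem pv_join_nil (ps : List (List Char)) : PySem.Chars.join [] ps = ps.flatten := by
  induction ps with
  | nil => rfl
  | cons a t ih =>
    cases t with
    | nil => simp [PySem.Chars.join, List.intercalate]
    | cons b u =>
      have h2 : PySem.Chars.join [] (a :: b :: u) = a ++ PySem.Chars.join [] (b :: u) := by
        simp [PySem.Chars.join, List.intercalate]
      rw [h2, ih]; simp

-- A's fold with two append-accumulators equals the reference.
theorem pv_aFold_eq (xs : List Char) (k : Int) (cs : List Char) (is : List Int) :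
    (PySem.List.enumerate xs k).foldl
        (fun (acc : List Char × List Int) ic =>
          if PySem.Chars.isalnum ic.2 then (acc.1 ++ [ic.2], acc.2 ++ [ic.1]) else acc)
        (cs, is)
      = (cs ++ (pvRef xs k).1, is ++ (pvRef xs k).2) := by
  induction xs generalizing k cs is with
  | nil => simp [pvRef, PySem.List.enumerate_nil]
  | cons c t ih =>
    by_cases h : PySem.Chars.isalnum c
    · simp [PySem.List.enumerate_cons, pvRef, h, ih]
    · simp [PySem.List.enumerate_cons, pvRef, h, ih]

-- One maximal run: the reference from i splits as slice[i:scan) ++ reference from scan.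
theorem pv_refRun (xs : List Char) (i : Nat) :
    pvRef (xs.drop i) (i : Int)
      = (PySem.List.slice xs (some (i : Int)) (some ((pvScanRun xs i : Nat) : Int))
           ++ (pvRef (xs.drop (pvScanRun xs i)) ((pvScanRun xs i : Nat) : Int)).1,
         PySem.List.pyRange (i : Int) ((pvScanRun xs i : Nat) : Int) 1
           ++ (pvRef (xs.drop (pvScanRun xs i)) ((pvScanRun xs i : Nat) : Int)).2) := by
  rw [pvScanRun]
  split
  next h =>
    split
    next ha =>
      have hge : i + 1 ≤ pvScanRun xs (i + 1) := pvScanRun_ge xs (i + 1)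
      have hdrop : xs.drop i = xs[i] :: xs.drop (i + 1) := List.drop_eq_getElem_cons h
      have ih := pv_refRun xs (i + 1)
      set s := pvScanRun xs (i + 1) with hs
      have hslice : PySem.List.slice xs (some (i : Int)) (some ((s : Nat) : Int))
          = xs[i] :: PySem.List.slice xs (some ((i + 1 : Nat) : Int)) (some ((s : Nat) : Int)) := by
        rw [PySem.List.slice_natCast, PySem.List.slice_natCast, hdrop]
        have : s - i = (s - (i + 1)) + 1 := by omega
        rw [this, List.take_succ_cons]
      have hrange : PySem.List.pyRange (i : Int) ((s : Nat) : Int) 1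
          = (i : Int) :: PySem.List.pyRange ((i + 1 : Nat) : Int) ((s : Nat) : Int) 1 := by
        rw [PySem.List.pyRange_one_cons (by exact_mod_cast Nat.lt_of_succ_le hge)]
        norm_num
      rw [hdrop]
      simp only [pvRef, ha, if_true]
      push_cast at ih hslice hrange ⊢
      rw [ih, hslice, hrange]
      simp
    next ha =>
      simp [PySem.List.slice_natCast, PySem.List.pyRange_one_eq_nil (le_refl (i : Int))]
  next h =>
    simp [PySem.List.slice_natCast, PySem.List.pyRange_one_eq_nil (le_refl (i : Int))]
termination_by xs.length - i
decreasing_by omega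

-- B's outer loop, characterised by the reference (flattening the collected parts).
theorem pv_runLoop_eq (xs : List Char) (i : Nat) (parts : List (List Char)) (idxs : List Int) :
    (pvRunLoop xs i parts idxs).1.flatten = parts.flatten ++ (pvRef (xs.drop i) (i : Int)).1
    ∧ (pvRunLoop xs i parts idxs).2 = idxs ++ (pvRef (xs.drop i) (i : Int)).2 := by
  rw [pvRunLoop]
  split
  next h =>
    split
    next ha =>
      have hge : i + 1 ≤ pvScanRun xs (i + 1) := pvScanRun_ge xs (i + 1)
      have hscan : pvScanRun xs i = pvScanRun xs (i + 1) := by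
        rw [pvScanRun]; simp [h, ha]
      have href := pv_refRun xs i
      rw [hscan] at href
      set j := pvScanRun xs (i + 1) with hj
      have ih := pv_runLoop_eq xs j
        (parts ++ [PySem.List.slice xs (some (i : Int)) (some ((j : Nat) : Int))])
        (idxs ++ PySem.List.pyRange (i : Int) ((j : Nat) : Int) 1)
      refine ⟨?_, ?_⟩
      · rw [ih.1, href]; simp
      · rw [ih.2, href]; simp
    next ha =>
      have hdrop : xs.drop i = xs[i] :: xs.drop (i + 1) := List.drop_eq_getElem_cons h
      have ih := pv_runLoop_eq xs (i + 1) parts idxs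
      rw [hdrop]
      simp only [pvRef, ha]
      have hc : ((i : Int) + 1) = ((i + 1 : Nat) : Int) := by push_cast; ring
      rw [hc]
      exact ih
  next h =>
    have : xs.drop i = [] := List.drop_eq_nil_of_le (by omega)
    simp [this, pvRef]
termination_by xs.length - i
decreasing_by
  · have := pvScanRun_ge xs (i + 1); omega
  · omega

-- ===== VERDICT (by name: the statement is the Claim_ definition above) =====
theorem normalized_with_index_map_py_spec : Claim_equal_normalized_with_index_map_py := by
  intro s _
  unfold Spec_normalized_with_index_map_py normalized_with_index_map_py normalized_with_index_map_py_alt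
  have hA := pv_aFold_eq s.toList 0 [] []
  have hB := pv_runLoop_eq s.toList 0 [] []
  simp only [List.drop_zero, List.flatten_nil, List.nil_append, Nat.cast_zero] at hA hB
  rw [hA]
  refine Prod.ext ?_ ?_
  · show String.mk (pvRef s.toList 0).1 = String.mk (PySem.Chars.join [] (pvRunLoop s.toList 0 [] []).1)
    rw [pv_join_nil, hB.1]
  · exact hB.2.symm
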